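-- pv_equiv track=rewrite | github.com/phin-cmd/Crane-Intelligence | backend/app/security/input_validator.py | validate_csrf_token
-- ===== SOURCE A (Python) =====
-- class SecurityValidationError(Exception):
--     """Custom exception for security validation errors"""
--     pass
--
-- def validate_csrf_token(token: str, expected_token: str) -> bool:
--     """Validate CSRF token"""
--     if not token or not expected_token:
--         raise SecurityValidationError("CSRF token is required")
--
--     if not isinstance(token, str) or not isinstance(expected_token, str):
--         raise SecurityValidationError("CSRF token must be a string")
--
--     # Use constant-time comparison to prevent timing attacks
--     if len(token) != len(expected_token):
--         return False
--
--     result = 0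
--     for a, b in zip(token, expected_token):
--         result |= ord(a) ^ ord(b)
--
--     return result == 0
-- ===== SOURCE B (Python) =====
-- class SecurityValidationError(Exception):
--     """Custom exception for security validation errors"""
--     pass
--
-- def validate_csrf_token(token: str, expected_token: str) -> bool:
--     """Validate CSRF token (simpler: built-in equality, same boolean result)"""
--     if not token or not expected_token:
--         raise SecurityValidationError("CSRF token is required")
--
--     if not isinstance(token, str) or not isinstance(expected_token, str):
--         raise SecurityValidationError("CSRF token must be a string")
--
--     return token == expected_token
-- ===== Notes on version B (the rewrite author's own statement) =====
-- stated objective: simpler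
-- what changed: B keeps A's two validation guards but replaces the length check plus per-character xor/or accumulator loop with a single built-in string equality, returning the same boolean.
import Mathlib
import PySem

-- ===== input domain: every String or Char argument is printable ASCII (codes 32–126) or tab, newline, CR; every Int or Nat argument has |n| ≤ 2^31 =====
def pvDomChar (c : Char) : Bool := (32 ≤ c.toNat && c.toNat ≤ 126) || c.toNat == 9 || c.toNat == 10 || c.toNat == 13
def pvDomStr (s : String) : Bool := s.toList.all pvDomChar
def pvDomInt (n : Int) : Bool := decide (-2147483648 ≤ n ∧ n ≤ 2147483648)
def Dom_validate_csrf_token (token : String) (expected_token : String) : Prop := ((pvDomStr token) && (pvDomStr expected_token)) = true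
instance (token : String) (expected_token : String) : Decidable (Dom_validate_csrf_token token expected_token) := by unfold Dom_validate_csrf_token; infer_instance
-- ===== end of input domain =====

-- B keeps A's guards but replaces the length check + xor/or accumulator loop with one built-in string equality; same boolean everywhere both return.

-- ===== PORT A =====
-- A: after the guards (excluded by Pre_), length check, then result |= ord a ^ ord b over zip, return result == 0.
-- ord values are nonnegative, so Nat ^^^ / ||| is exact here.
def validate_csrf_token (token : String) (expected_token : String) : Bool :=
  if token.toList.length ≠ expected_token.toList.length then false
  else
    let result :=
      (List.zip token.toList expected_token.toList).foldl
        (fun r p => r ||| (p.1.toNat ^^^ p.2.toNat)) 0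
    result == 0

-- ===== PORT B =====
def validate_csrf_token_alt (token : String) (expected_token : String) : Bool :=
  token == expected_token

-- ===== PRECONDITION & SPEC =====
-- Pre_ excludes exactly the inputs where A raises SecurityValidationError (an empty token or
-- expected_token); B raises there too.
def Pre_validate_csrf_token (token : String) (expected_token : String) : Prop :=
  token ≠ "" ∧ expected_token ≠ ""
instance (token : String) (expected_token : String) : Decidable (Pre_validate_csrf_token token expected_token) := by unfold Pre_validate_csrf_token; infer_instance

def pvWitness_validate_csrf_token : String × String := ("abc", "abd")

def Spec_validate_csrf_token (token : String) (expected_token : String) (out : Bool) : Prop := out = validate_csrf_token_alt token expected_token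
instance (token : String) (expected_token : String) (out : Bool) : Decidable (Spec_validate_csrf_token token expected_token out) := by unfold Spec_validate_csrf_token; infer_instance

-- ===== CLAIM (what is proved, stated in full; the proofs are below) =====
def Claim_equal_validate_csrf_token : Prop := ∀ (token : String) (expected_token : String), Dom_validate_csrf_token token expected_token → Pre_validate_csrf_token token expected_token → Spec_validate_csrf_token token expected_token (validate_csrf_token token expected_token)

-- ===== LEMMAS AND PROOFS =====

theorem or_eq_zero_iff (a b : Nat) : a ||| b = 0 ↔ a = 0 ∧ b = 0 := by
  constructor
  · intro h
    constructor
    · apply Nat.eq_of_testBit_eq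
      intro i
      have := congrArg (fun n => n.testBit i) h
      simp [Nat.testBit_or] at this
      simp [this.1]
    · apply Nat.eq_of_testBit_eq
      intro i
      have := congrArg (fun n => n.testBit i) h
      simp [Nat.testBit_or] at this
      simp [this.2]
  · rintro ⟨rfl, rfl⟩; rfl

theorem foldl_or_eq_zero (g : Char × Char → Nat) :
    ∀ (l : List (Char × Char)) (acc : Nat),
      (l.foldl (fun r p => r ||| g p) acc = 0 ↔ acc = 0 ∧ ∀ p ∈ l, g p = 0) := by
  intro l
  induction l with
  | nil => intro acc; simp
  | cons a t ih =>
      intro acc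
      simp only [List.foldl_cons, ih, List.mem_cons]
      constructor
      · rintro ⟨h1, h2⟩
        rcases (or_eq_zero_iff _ _).mp h1 with ⟨ha, hb⟩
        exact ⟨ha, fun p hp => by rcases hp with rfl | hp; exact hb; exact h2 p hp⟩
      · rintro ⟨ha, h2⟩
        exact ⟨(or_eq_zero_iff _ _).mpr ⟨ha, h2 a (Or.inl rfl)⟩, fun p hp => h2 p (Or.inr hp)⟩

theorem char_toNat_inj (a b : Char) (h : a.toNat = b.toNat) : a = b :=
  Char.ext (UInt32.toNat_inj.mp (by unfold Char.toNat at h; exact h))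

theorem zip_all_eq_iff :
    ∀ (l1 l2 : List Char), l1.length = l2.length →
      ((∀ p ∈ List.zip l1 l2, p.1.toNat ^^^ p.2.toNat = 0) ↔ l1 = l2) := by
  intro l1
  induction l1 with
  | nil => intro l2 h; cases l2 <;> simp_all
  | cons a t ih =>
      intro l2 h
      cases l2 with
      | nil => simp at h
      | cons b t2 =>
          simp only [List.length_cons, Nat.succ_inj] at h
          simp only [List.zip_cons_cons, List.mem_cons, List.cons.injEq]
          constructor
          · intro hp
            refine ⟨char_toNat_inj a b (Nat.xor_eq_zero_iff.mp (hp (a, b) (Or.inl rfl))), ?_⟩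
            exact (ih t2 h).mp (fun p hp2 => hp p (Or.inr hp2))
          · rintro ⟨rfl, rfl⟩
            intro p hp
            rcases hp with rfl | hp
            · exact Nat.xor_self _
            · exact ((ih t h).mpr rfl) p hp

-- ===== VERDICT (by name: the statement is the Claim_ definition above) =====
theorem validate_csrf_token_spec : Claim_equal_validate_csrf_token := by
  intro token expected_token _ _
  unfold Spec_validate_csrf_token validate_csrf_token validate_csrf_token_alt
  by_cases hlen : token.toList.length = expected_token.toList.length
  · rw [if_neg (by simp [hlen])]
    have hiff : ((List.zip token.toList expected_token.toList).foldl
        (fun r p => r ||| (p.1.toNat ^^^ p.2.toNat)) 0 = 0) ↔ token = expected_token := by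
      rw [foldl_or_eq_zero (fun p => p.1.toNat ^^^ p.2.toNat)
        (List.zip token.toList expected_token.toList) 0]
      constructor
      · rintro ⟨_, h2⟩
        exact String.toList_inj.mp ((zip_all_eq_iff _ _ hlen).mp h2)
      · intro h; subst h; exact ⟨rfl, (zip_all_eq_iff _ _ hlen).mpr rfl⟩
    rw [Bool.eq_iff_iff]
    simp only [beq_iff_eq]
    exact hiff
  · rw [if_pos (by simpa [← String.length_toList] using hlen)]
    have hne : token ≠ expected_token := fun h => hlen (by rw [h])
    simp [hne]
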